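-- pv_equiv track=rewrite | github.com/DurininKirous/VkCourse | module_1/lesson_7/task_1.py | findLastEvenContainer
-- ===== SOURCE A (Python) =====
-- def findLastEvenContainer(array):
--     stack = []
--     for i in range(len(array)):
--         if array[i]%2 == 0:
--             stack.append(array[i])
--     if stack:
--         return stack.pop()
--     else:
--         return -1
-- ===== SOURCE B (Python) =====
-- def findLastEvenContainer(array):
--     for x in reversed(array):
--         if x % 2 == 0:
--             return x
--     return -1
-- ===== Notes on version B (the rewrite author's own statement) =====
-- stated objective: simpler
-- what changed: Instead of building a list of all evens and popping the last one, B scans the array in reverse and returns the first even element it meets (early exit), with no auxiliary list.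
import Mathlib
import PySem

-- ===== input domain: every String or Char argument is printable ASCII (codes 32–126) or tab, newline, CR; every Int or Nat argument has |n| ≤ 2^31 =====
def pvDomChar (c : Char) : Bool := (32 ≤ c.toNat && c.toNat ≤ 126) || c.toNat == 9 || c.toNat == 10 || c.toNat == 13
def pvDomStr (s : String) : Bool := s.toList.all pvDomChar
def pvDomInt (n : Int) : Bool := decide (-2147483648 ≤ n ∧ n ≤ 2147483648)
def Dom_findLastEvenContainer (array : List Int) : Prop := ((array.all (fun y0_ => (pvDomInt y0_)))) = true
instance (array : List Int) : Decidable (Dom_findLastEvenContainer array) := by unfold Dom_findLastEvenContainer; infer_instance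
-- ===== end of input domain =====

-- B replaces A's collect-all-evens-then-pop with a reverse scan returning the first even (no auxiliary list); same return value.

-- ===== PORT A =====
-- collects evens into `stack`, then pops the last one (or returns -1 if empty)
def findLastEvenContainer (array : List Int) : Int :=
  let stack := (PySem.List.pyRange 0 (PySem.List.len array) 1).foldl
    (fun st i =>
      if PySem.Int.mod (PySem.List.pyGetD array i 0) 2 == 0
      then st ++ [PySem.List.pyGetD array i 0] else st) []
  match stack.getLast? with
  | some v => v
  | none => -1

-- ===== PORT B =====
-- scan the reversed list, return the first even element encountered
def findRevEven : List Int → Int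
  | [] => -1
  | x :: t => if PySem.Int.mod x 2 == 0 then x else findRevEven t

def findLastEvenContainer_alt (array : List Int) : Int :=
  findRevEven array.reverse

-- ===== PRECONDITION & SPEC =====
def Spec_findLastEvenContainer (array : List Int) (out : Int) : Prop := out = findLastEvenContainer_alt array
instance (array : List Int) (out : Int) : Decidable (Spec_findLastEvenContainer array out) := by unfold Spec_findLastEvenContainer; infer_instance

-- ===== CLAIM (what is proved, stated in full; the proofs are below) =====
def Claim_equal_findLastEvenContainer : Prop := ∀ (array : List Int), Dom_findLastEvenContainer array → Spec_findLastEvenContainer array (findLastEvenContainer array)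

-- ===== LEMMAS AND PROOFS =====

-- B's scan is head-of-filter (or -1)
theorem findRevEven_eq_head (l : List Int) :
    findRevEven l = match (l.filter (fun x => PySem.Int.mod x 2 == 0)).head? with
      | some v => v | none => -1 := by
  induction l with
  | nil => rfl
  | cons x t ih =>
    by_cases h : (2:Int) ∣ x
    · simp [findRevEven, h]
    · simp [findRevEven, h, ih]

-- ===== VERDICT (by name: the statement is the Claim_ definition above) =====
theorem findLastEvenContainer_spec : Claim_equal_findLastEvenContainer := by
  intro array _
  show findLastEvenContainer array = findLastEvenContainer_alt array
  unfold findLastEvenContainer findLastEvenContainer_alt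
  rw [PySem.List.foldl_pyRange_zero_pyGetD array 0
      (fun st x => if PySem.Int.mod x 2 == 0 then st ++ [x] else st) []]
  rw [PySem.List.foldl_append_if_eq_filter]
  rw [findRevEven_eq_head, List.filter_reverse, ← List.getLast?_eq_head?_reverse]
  simp
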